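-- pv_equiv track=rewrite | github.com/Ryanauger95/Email-Manager | scripts/build_priority_senders.py | is_noreply
-- ===== SOURCE A (Python) =====
-- def is_noreply(email: str) -> bool:
--     """Filter out automated/noreply addresses."""
--     skip_patterns = [
--         "noreply", "no-reply", "donotreply", "do-not-reply",
--         "mailer-daemon", "postmaster@", "bounce",
--         "calendar-notification",
--     ]
--     email_lower = email.lower()
--     return any(pattern in email_lower for pattern in skip_patterns)
-- ===== SOURCE B (Python) =====
-- _SKIP_PATTERNS = (
--     "noreply", "no-reply", "donotreply", "do-not-reply",
--     "mailer-daemon", "postmaster@", "bounce",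
--     "calendar-notification",
-- )
--
-- def is_noreply(email: str) -> bool:
--     """Filter out automated/noreply addresses.
--
--     Single left-to-right scan: at each position of the lowered string,
--     test whether any skip pattern starts there, instead of running a
--     separate substring search per pattern.
--     """
--     s = email.lower()
--     for i in range(len(s) + 1):
--         if any(s.startswith(p, i) for p in _SKIP_PATTERNS):
--             return True
--     return False
-- ===== Notes on version B (the rewrite author's own statement) =====
-- stated objective: alternative
-- what changed: Replaces per-pattern substring searches ('pattern in email_lower' over the list) with a single left-to-right scan of the lowered string that at each position tests whether any skip pattern starts there.
import Mathlib
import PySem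

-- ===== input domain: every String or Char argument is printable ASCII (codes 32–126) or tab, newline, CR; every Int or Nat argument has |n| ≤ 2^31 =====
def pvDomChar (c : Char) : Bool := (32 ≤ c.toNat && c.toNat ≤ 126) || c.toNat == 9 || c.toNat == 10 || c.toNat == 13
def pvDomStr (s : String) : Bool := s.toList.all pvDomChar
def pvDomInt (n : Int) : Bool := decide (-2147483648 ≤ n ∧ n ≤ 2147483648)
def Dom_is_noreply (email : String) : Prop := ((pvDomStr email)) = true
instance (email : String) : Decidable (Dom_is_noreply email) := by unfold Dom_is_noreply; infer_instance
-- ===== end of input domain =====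

-- B replaces per-pattern substring searches with a single left-to-right position scan
-- of the lowered string (alternative decomposition, same results).


-- ===== PORT A =====
-- A's skip_patterns list, verbatim
def skipPatternsA : List String :=
  ["noreply", "no-reply", "donotreply", "do-not-reply",
   "mailer-daemon", "postmaster@", "bounce",
   "calendar-notification"]

-- any(pattern in email_lower for pattern in skip_patterns)
def is_noreply (email : String) : Bool :=
  let email_lower := PySem.Str.lower email
  skipPatternsA.any (fun pattern => PySem.Str.isIn pattern email_lower)

-- ===== PORT B =====
-- B's _SKIP_PATTERNS tuple, verbatim (as lists of chars for the position scan)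
def skipPatternsB : List (List Char) :=
  ["noreply".toList, "no-reply".toList, "donotreply".toList, "do-not-reply".toList,
   "mailer-daemon".toList, "postmaster@".toList, "bounce".toList,
   "calendar-notification".toList]

-- the 'for i in range(len(s)+1): if any(s.startswith(p, i) …): return True' scan,
-- as structural recursion over the current suffix of s
def scanB (pats : List (List Char)) (s : List Char) : Bool :=
  if pats.any (fun p => PySem.Chars.startswith s p) then true
  else
    match s with
    | [] => false
    | _ :: t => scanB pats t

def is_noreply_alt (email : String) : Bool :=
  scanB skipPatternsB (PySem.Chars.lower email.toList)

-- ===== PRECONDITION & SPEC =====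
def Spec_is_noreply (email : String) (out : Bool) : Prop := out = is_noreply_alt email
instance (email : String) (out : Bool) : Decidable (Spec_is_noreply email out) := by unfold Spec_is_noreply; infer_instance

-- ===== CLAIM (what is proved, stated in full; the proofs are below) =====
def Claim_equal_is_noreply : Prop := ∀ (email : String), Dom_is_noreply email → Spec_is_noreply email (is_noreply email)

-- ===== LEMMAS AND PROOFS =====

-- the position scan finds a pattern iff it is a prefix of some suffix
theorem scanB_eq_true_iff (pats : List (List Char)) (s : List Char) :
    scanB pats s = true ↔ ∃ p ∈ pats, ∃ j, PySem.Chars.startswith (List.drop j s) p = true := by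
  induction s with
  | nil =>
      simp [scanB, List.any_eq_true]
  | cons c t ih =>
      rw [scanB]
      by_cases h : pats.any (fun p => PySem.Chars.startswith (c :: t) p) = true
      · simp only [h, if_true, true_iff]
        rw [List.any_eq_true] at h
        obtain ⟨p, hp, hs⟩ := h
        exact ⟨p, hp, 0, hs⟩
      · rw [if_neg h, ih]
        constructor
        · rintro ⟨p, hp, j, hj⟩
          exact ⟨p, hp, j + 1, by simpa using hj⟩
        · rintro ⟨p, hp, j, hj⟩
          cases j with
          | zero =>
              exact absurd (List.any_eq_true.mpr ⟨p, hp, by simpa using hj⟩) h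
          | succ j' =>
              exact ⟨p, hp, j', by simpa using hj⟩

-- the scan over all positions equals per-pattern substring membership
theorem scanB_eq_any_isIn (pats : List (List Char)) (s : List Char) :
    scanB pats s = pats.any (fun p => PySem.Chars.isIn p s) := by
  rcases h : pats.any (fun p => PySem.Chars.isIn p s) with _ | _
  · rw [Bool.eq_false_iff]
    intro hc
    rw [scanB_eq_true_iff] at hc
    obtain ⟨p, hp, j, hj⟩ := hc
    have : PySem.Chars.isIn p s = true := by
      rw [← PySem.Chars.exists_prefix_drop_iff_isIn]
      exact ⟨j, (PySem.Chars.startswith_iff _ _).mp hj⟩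
    have hf := List.any_eq_false.mp (by simpa using h) p hp
    simp [this] at hf
  · rw [List.any_eq_true] at h
    obtain ⟨p, hp, hi⟩ := h
    obtain ⟨j, hj⟩ := (PySem.Chars.exists_prefix_drop_iff_isIn p s).mpr (by simpa using hi)
    rw [scanB_eq_true_iff]
    exact ⟨p, hp, j, (PySem.Chars.startswith_iff _ _).mpr hj⟩

-- ===== VERDICT (by name: the statement is the Claim_ definition above) =====
theorem is_noreply_spec : Claim_equal_is_noreply := by
  intro email _
  unfold Spec_is_noreply is_noreply is_noreply_alt
  rw [scanB_eq_any_isIn]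
  simp [skipPatternsA, skipPatternsB]
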